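-- pv_equiv track=rewrite | github.com/lclpsoz/competitive-programming | CF/cf-1159/bruteD.py | check
-- ===== SOURCE A (Python) =====
-- def check (msk, k):
--     ok = True
--     for sz in range (1, k):
--         mp = {}
--         for i in range (len(msk)-sz+1):
--             if (msk[i:i+sz] in mp):
--                 mp[msk[i:i+sz]]+=1
--             else:
--                 mp[msk[i:i+sz]] = 1
--         for p in mp:
--             if (mp[p] == 1):
--                 ok = False
--                 break
--     if (not ok):
--         return None
--     mp = {}
--     for i in range (len(msk)-k+1):
--         # print (msk[i:i+k])
--         if (msk[i:i+k] in mp):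
--             mp[msk[i:i+k]]+=1
--         else:
--             mp[msk[i:i+k]] = 1
--     ok = False
--     now = ""
--     for p in mp:
--         if (mp[p] == 1):
--             now = p
--             ok = True
--             break
--
--     return (msk, now)
-- ===== SOURCE B (Python) =====
-- def check(msk, k):
--     n = len(msk)
--
--     def substrings(sz):
--         return [msk[i:i+sz] for i in range(n - sz + 1)]
--
--     def uniques(sz):
--         # run-length scan of the sorted substring list: keep those whose run has length 1
--         uniq = []
--         prev = None
--         cnt = 0
--         for s in sorted(substrings(sz)):
--             if s == prev:
--                 cnt += 1
--             else:
--                 if cnt == 1: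
--                     uniq.append(prev)
--                 prev = s
--                 cnt = 1
--         if cnt == 1:
--             uniq.append(prev)
--         return set(uniq)
--
--     for sz in range(1, k):
--         if uniques(sz):
--             return None
--     u = uniques(k)
--     now = ""
--     for s in substrings(k):
--         if s in u:
--             now = s
--             break
--     return (msk, now)
-- ===== Notes on version B (the rewrite author's own statement) =====
-- stated objective: faster
-- what changed: Replaces per-length hash-map counting and dict-order scans with sort-then-run-length-scan uniqueness detection (unique substrings are runs of length 1 in the sorted substring list), returning None early at the first length that has a unique substring instead of A's scanning all k-1 lengths; the final answer is found by scanning positions for membership in the precomputed unique-set.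
import Mathlib
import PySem

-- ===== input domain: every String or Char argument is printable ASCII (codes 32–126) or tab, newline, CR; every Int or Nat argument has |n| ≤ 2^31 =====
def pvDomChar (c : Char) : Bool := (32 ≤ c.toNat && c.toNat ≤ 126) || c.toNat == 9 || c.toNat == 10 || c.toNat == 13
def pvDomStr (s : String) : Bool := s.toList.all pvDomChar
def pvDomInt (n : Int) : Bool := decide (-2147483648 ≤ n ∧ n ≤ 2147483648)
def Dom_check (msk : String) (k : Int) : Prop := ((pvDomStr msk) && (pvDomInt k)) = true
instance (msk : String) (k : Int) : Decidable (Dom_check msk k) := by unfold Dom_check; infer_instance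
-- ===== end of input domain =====

-- B replaces A's per-length dict counting and insertion-order scans by sorting each
-- length's substring list and run-length scanning it for runs of length 1 (alternative
-- algorithm, early exit on the first length that has a unique substring).

-- ===== PORT A =====
-- the counting dict A builds for substrings of length sz
def checkDict (msk : String) (sz : Int) : PySem.Dict String Int :=
  (PySem.List.pyRange 0 ((PySem.Str.len msk : Int) - sz + 1) 1).foldl
    (fun mp i =>
      if mp.contains (PySem.Str.slice msk (some i) (some (i + sz))) then
        mp.modify (PySem.Str.slice msk (some i) (some (i + sz))) 0 (· + 1)
      else
        mp.insert (PySem.Str.slice msk (some i) (some (i + sz))) 1)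
    PySem.Dict.empty

-- 'for p in mp: if mp[p] == 1: ok = False; break'
def checkBreak1 : List (String × Int) → Bool → Bool
  | [], ok => ok
  | p :: rest, ok => if p.2 == 1 then false else checkBreak1 rest ok

-- 'for p in mp: if mp[p] == 1: now = p; ok = True; break'  (now = "" initially)
def checkFind : List (String × Int) → String
  | [] => ""
  | p :: rest => if p.2 == 1 then p.1 else checkFind rest

def check (msk : String) (k : Int) : Option (String × String) :=
  let ok := (PySem.List.pyRange 1 k 1).foldl
    (fun ok sz => checkBreak1 (checkDict msk sz).items ok) true
  if !ok then none
  else some (msk, checkFind (checkDict msk k).items)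

-- ===== PORT B =====
-- [msk[i:i+sz] for i in range(n - sz + 1)]
def altSubs (msk : String) (sz : Int) : List String :=
  (PySem.List.pyRange 0 ((PySem.Str.len msk : Int) - sz + 1) 1).map
    (fun i => PySem.Str.slice msk (some i) (some (i + sz)))

-- one step of the run-length scan over the sorted substring list
def altStep : List String × Option String × Int → String → List String × Option String × Int
  | (uniq, prev, cnt), s =>
    if some s == prev then (uniq, prev, cnt + 1)
    else ((if cnt == 1 then uniq ++ [prev.getD ""] else uniq), some s, 1)

-- sorted(...) ported as the stable merge sort (same value as Python's stable sort)
def altUniques (msk : String) (sz : Int) : PySem.Set String :=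
  let st := ((altSubs msk sz).mergeSort (fun a b => decide (a ≤ b))).foldl altStep ([], none, 0)
  PySem.Set.ofList (if st.2.2 == 1 then st.1 ++ [st.2.1.getD ""] else st.1)

-- 'for s in substrings(k): if s in u: now = s; break'
def altFind : List String → PySem.Set String → String
  | [], _ => ""
  | s :: rest, u => if u.contains s then s else altFind rest u

-- 'for sz in range(1, k): if uniques(sz): return None'  then the final part
def altLoop (msk : String) (k : Int) : List Int → Option (String × String)
  | [] => some (msk, altFind (altSubs msk k) (altUniques msk k))
  | sz :: rest => if (altUniques msk sz).isEmpty then altLoop msk k rest else none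

def check_alt (msk : String) (k : Int) : Option (String × String) :=
  altLoop msk k (PySem.List.pyRange 1 k 1)

-- ===== PRECONDITION & SPEC =====
def Spec_check (msk : String) (k : Int) (out : Option (String × String)) : Prop := out = check_alt msk k
instance (msk : String) (k : Int) (out : Option (String × String)) : Decidable (Spec_check msk k out) := by unfold Spec_check; infer_instance

-- ===== CLAIM (what is proved, stated in full; the proofs are below) =====
def Claim_equal_check : Prop := ∀ (msk : String) (k : Int), Dom_check msk k → Spec_check msk k (check msk k)

-- ===== LEMMAS AND PROOFS =====

-- A's dict is the counter of the substring list
theorem checkDict_eq_counter (msk : String) (sz : Int) :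
    checkDict msk sz = PySem.Dict.counter (altSubs msk sz) := by
  unfold checkDict altSubs PySem.Dict.counter
  rw [List.foldl_map]
  congr 1
  funext mp i
  by_cases h : mp.contains (PySem.Str.slice msk (some i) (some (i + sz))) = true
  · rw [if_pos h]
  · rw [if_neg h]
    unfold PySem.Dict.modify
    have h0 : mp.getD (PySem.Str.slice msk (some i) (some (i + sz))) 0 = 0 := by
      unfold PySem.Dict.getD
      rw [(PySem.Dict.get?_eq_none_iff_contains mp _).2 (by simpa using h)]
      rfl
    rw [h0]
    norm_num

-- break-loop characterisation
theorem checkBreak1_eq (il : List (String × Int)) (ok : Bool) :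
    checkBreak1 il ok = if il.any (fun p => p.2 == 1) then false else ok := by
  induction il with
  | nil => simp [checkBreak1]
  | cons p rest ih =>
    simp only [checkBreak1, List.any_cons]
    by_cases h : (p.2 == 1) = true <;> simp [h, ih]

-- find-loop over a (key, value) map
theorem checkFind_map (xs : List String) (g : String → Int) :
    checkFind (xs.map (fun s => (s, g s))) = ((xs.find? (fun s => g s == 1)).getD "") := by
  induction xs with
  | nil => simp [checkFind]
  | cons x t ih =>
    simp only [List.map_cons, checkFind, List.find?]
    by_cases h : (g x == 1) = true <;> simp [h, ih]

-- the state after the run-length fold, flushed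
def altFlush (st : List String × Option String × Int) : List String :=
  if st.2.2 == 1 then st.1 ++ [st.2.1.getD ""] else st.1

-- fold over a run of equal elements just counts
theorem altStep_replicate (m : Nat) (acc : List String) (x : String) (c : Int) :
    (List.replicate m x).foldl altStep (acc, some x, c) = (acc, some x, c + m) := by
  induction m generalizing c with
  | zero => simp
  | succ n ih =>
    rw [List.replicate_succ, List.foldl_cons]
    have h1 : altStep (acc, some x, c) x = (acc, some x, c + 1) := by
      simp [altStep]
    rw [h1, ih]
    congr 1
    push_cast
    ring_nf

-- the accumulator only receives appends
theorem altStep_acc (l : List String) (acc : List String) (p : Option String) (c : Int) :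
    l.foldl altStep (acc, p, c) =
      (acc ++ (l.foldl altStep ([], p, c)).1, (l.foldl altStep ([], p, c)).2) := by
  induction l generalizing acc p c with
  | nil => simp
  | cons s t ih =>
    simp only [List.foldl_cons, altStep]
    by_cases h : (some s == p) = true
    · rw [if_pos h, if_pos h, ih]
    · rw [if_neg h, if_neg h]
      by_cases hc : (c == 1) = true
      · rw [if_pos hc, if_pos hc]
        simp only [List.nil_append]
        rw [ih (acc ++ [p.getD ""]) (some s) 1, ih [p.getD ""] (some s) 1]
        simp [List.append_assoc]
      · rw [if_neg hc, if_neg hc, ih acc (some s) 1]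

-- a sorted list starts with a maximal run
theorem run_split (l : List String) (h : l.Pairwise (· ≤ ·)) :
    l = [] ∨ ∃ x m r, l = List.replicate (m + 1) x ++ r ∧ x ∉ r ∧ r.Pairwise (· ≤ ·) := by
  induction l with
  | nil => exact Or.inl rfl
  | cons x t ih =>
    right
    rw [List.pairwise_cons] at h
    obtain ⟨hx, ht⟩ := h
    rcases ih ht with rfl | ⟨x', m, r, rfl, hnot, hr⟩
    · exact ⟨x, 0, [], by simp, by simp, List.Pairwise.nil⟩
    · by_cases hxx : x = x'
      · subst hxx
        exact ⟨x, m + 1, r, by simp [List.replicate_succ], hnot, hr⟩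
      · refine ⟨x, 0, List.replicate (m + 1) x' ++ r, by simp [List.replicate], ?_, ht⟩
        intro hmem
        rcases List.mem_append.1 hmem with hm | hm
        · exact hxx (List.eq_of_mem_replicate hm)
        · have h1 : x ≤ x' := hx x' (by simp [List.mem_append, List.mem_replicate])
          have h2 : x' ≤ x := by
            rw [List.pairwise_append] at ht
            exact ht.2.2 x' (by simp [List.mem_replicate]) x hm
          exact hxx (le_antisymm h1 h2)

-- the flush distributes over a prefix already in the accumulator
theorem altFlush_append (a : List String) (st : List String × Option String × Int) :
    altFlush (a ++ st.1, st.2) = a ++ altFlush st := by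
  obtain ⟨b, p, c⟩ := st
  unfold altFlush
  by_cases hc : (c == 1) = true <;> simp [hc]

-- MAIN: the run-length scan of a sorted list collects exactly the count-1 elements
theorem altFlush_mem (l : List String) (h : l.Pairwise (· ≤ ·)) (y : String) :
    y ∈ altFlush (l.foldl altStep ([], none, 0)) ↔ l.count y = 1 := by
  suffices H : ∀ (n : Nat) (l : List String), l.length ≤ n → l.Pairwise (· ≤ ·) →
      ∀ y, (y ∈ altFlush (l.foldl altStep ([], none, 0)) ↔ l.count y = 1) from
    H l.length l le_rfl h y
  intro n
  induction n with
  | zero =>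
    intro l hl _ y
    rw [Nat.le_zero, List.length_eq_zero_iff] at hl
    subst hl
    simp [altFlush]
  | succ n ih =>
    intro l hl hp y
    rcases run_split l hp with rfl | ⟨x, m, r, rfl, hnot, hr⟩
    · simp [altFlush]
    · rw [List.foldl_append, List.replicate_succ, List.foldl_cons]
      have h0 : altStep ([], none, 0) x = ([], some x, 1) := by
        simp [altStep]
      rw [h0, altStep_replicate m [] x 1]
      cases r with
      | nil =>
        rw [List.foldl_nil]
        unfold altFlush
        simp only [Option.getD_some, List.append_nil, List.nil_append]
        by_cases hy : x = y
        · subst hy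
          by_cases hm : ((1 : Int) + (m : Nat) == 1) = true
          · have hm0 : m = 0 := by
              have := beq_iff_eq.1 hm
              omega
            subst hm0
            simp
          · have hm1 : ¬ ((1 : Int) + (m : Nat)) = 1 := by simpa using hm
            have hm0 : m ≠ 0 := by
              intro hh; subst hh; exact hm1 (by norm_num)
            simp only [if_neg hm]
            simp [hm0]
        · have hyx : y ≠ x := Ne.symm hy
          have hmem : y ∉ (if ((1 : Int) + (m : Nat) == 1) = true then [x] else []) := by
            split <;> simp [hyx]
          simp [List.count_replicate, hyx, hy]
      | cons z r' =>
        have hzx : x ≠ z := fun hh => hnot (by simp [hh])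
        rw [List.foldl_cons]
        have hzx' : z ≠ x := Ne.symm hzx
        have hne : (some z == some x) = false := by
          simp [hzx']
        have hstep : altStep ([], some x, 1 + (m : Nat)) z
            = ((if ((1 : Int) + (m : Nat) == 1) = true then [x] else []), some z, 1) := by
          simp only [altStep, hne, Bool.false_eq_true, if_neg (by simp : ¬False)]
          split <;> simp
        rw [hstep, altStep_acc, altFlush_append]
        have hback : r'.foldl altStep ([], some z, 1) = (z :: r').foldl altStep ([], none, 0) := by
          rw [List.foldl_cons]
          congr 1
        rw [List.mem_append, hback,
          ih (z :: r') (by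
            have := hl
            simp only [List.length_append, List.length_replicate, List.length_cons] at this ⊢
            omega) hr y]
        simp only [List.count_append]
        by_cases hy : x = y
        · subst hy
          have h0 : List.count x (z :: r') = 0 := List.count_eq_zero.2 hnot
          rw [h0]
          by_cases hm : ((1 : Int) + (m : Nat) == 1) = true
          · have hm0 : m = 0 := by
              have := beq_iff_eq.1 hm
              omega
            subst hm0
            simp
          · have hm1 : ¬ ((1 : Int) + (m : Nat)) = 1 := by simpa using hm
            have hm0 : m ≠ 0 := by
              intro hh; subst hh; exact hm1 (by norm_num)
            simp only [if_neg hm]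
            simp [hm0]
        · have hyx : y ≠ x := Ne.symm hy
          have hδ : y ∉ (if ((1 : Int) + (m : Nat) == 1) = true then [x] else []) := by
            split <;> simp [hyx]
          simp [List.count_cons, List.count_replicate, hyx, hy]

theorem altUniques_mem (msk : String) (sz : Int) (y : String) :
    y ∈ altUniques msk sz ↔ (altSubs msk sz).count y = 1 := by
  simp only [altUniques]
  rw [PySem.Set.mem_ofList]
  have hpw : ((altSubs msk sz).mergeSort (fun a b => decide (a ≤ b))).Pairwise (· ≤ ·) := by
    have := List.pairwise_mergeSort (le := fun a b : String => decide (a ≤ b))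
      (fun a b c hab hbc => by
        simp only [decide_eq_true_eq] at hab hbc ⊢
        exact le_trans hab hbc)
      (fun a b => by
        simp only [Bool.or_eq_true, decide_eq_true_eq]
        exact le_total a b) (altSubs msk sz)
    simpa using this
  have hs := altFlush_mem ((altSubs msk sz).mergeSort (fun a b => decide (a ≤ b))) hpw y
  unfold altFlush at hs
  rw [hs, (List.mergeSort_perm (altSubs msk sz) (fun a b => decide (a ≤ b))).count_eq y]

-- find? over the first-occurrence dedup is find? over the list
theorem foldl_add_prefix (t acc : List String) :
    ∃ r, t.foldl PySem.Set.add acc = acc ++ r := by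
  induction t generalizing acc with
  | nil => exact ⟨[], by simp⟩
  | cons x t ih =>
    rw [List.foldl_cons]
    by_cases h : PySem.Set.contains acc x = true
    · rw [show PySem.Set.add acc x = acc from by unfold PySem.Set.add; rw [if_pos h]]
      exact ih acc
    · rw [show PySem.Set.add acc x = acc ++ [x] from by unfold PySem.Set.add; rw [if_neg h]]
      obtain ⟨r, hr⟩ := ih (acc ++ [x])
      exact ⟨[x] ++ r, by simpa [List.append_assoc] using hr⟩

theorem find?_foldl_add (P : String → Bool) (t acc : List String)
    (h : ∀ y ∈ acc, P y = false) :
    (t.foldl PySem.Set.add acc).find? P = t.find? P := by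
  induction t generalizing acc with
  | nil =>
    simp only [List.foldl_nil, List.find?_nil]
    exact List.find?_eq_none.2 fun x hx => by simp [h x hx]
  | cons x t ih =>
    rw [List.foldl_cons]
    by_cases hP : P x = true
    · have hxa : PySem.Set.contains acc x = false := by
        rcases hc : PySem.Set.contains acc x with _ | _
        · rfl
        · exact absurd hP (by simp [h x (List.contains_iff_mem.1 hc)])
      rw [show PySem.Set.add acc x = acc ++ [x] from by
        unfold PySem.Set.add; rw [hxa]; simp]
      obtain ⟨r, hr⟩ := foldl_add_prefix t (acc ++ [x])
      rw [hr, List.append_assoc, List.find?_append]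
      have hacc : acc.find? P = none := List.find?_eq_none.2 fun y hy => by simp [h y hy]
      simp [hacc, hP]
    · have hP' : P x = false := by simpa using hP
      have hstep : ∀ y ∈ PySem.Set.add acc x, P y = false := by
        intro y hy
        unfold PySem.Set.add at hy
        by_cases hc : PySem.Set.contains acc x = true
        · rw [if_pos hc] at hy
          exact h y hy
        · rw [if_neg hc] at hy
          rcases List.mem_append.1 hy with hy | hy
          · exact h y hy
          · simp only [List.mem_singleton] at hy
            subst hy; exact hP'
      rw [ih (PySem.Set.add acc x) hstep, List.find?_cons, hP']

theorem find?_ofList (P : String → Bool) (l : List String) :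
    (PySem.Set.ofList l).find? P = l.find? P := by
  exact find?_foldl_add P l [] (by simp)

-- B's membership loop
theorem altFind_eq (xs : List String) (u : PySem.Set String) :
    altFind xs u = ((xs.find? (fun s => u.contains s)).getD "") := by
  induction xs with
  | nil => simp [altFind]
  | cons s t ih =>
    have e : altFind (s :: t) u = if u.contains s = true then s else altFind t u := rfl
    rw [e, List.find?_cons]
    cases h : u.contains s with
    | true => simp
    | false => simpa using ih

-- the two "now" strings agree
theorem now_eq (msk : String) (k : Int) :
    checkFind (checkDict msk k).items = altFind (altSubs msk k) (altUniques msk k) := by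
  rw [checkDict_eq_counter, PySem.Dict.items_counter, checkFind_map, altFind_eq]
  have hpred : (fun s => (altUniques msk k).contains s)
      = (fun s => ((List.count s (altSubs msk k) : Int) == 1)) := by
    funext s
    rw [← Bool.coe_iff_coe]
    constructor
    · intro hcon
      have h1 : s ∈ altUniques msk k := List.contains_iff_mem.1 hcon
      have h2 := (altUniques_mem msk k s).1 h1
      simp [h2]
    · intro hbeq
      have h1 : List.count s (altSubs msk k) = 1 := by exact_mod_cast beq_iff_eq.1 hbeq
      exact List.contains_iff_mem.2 ((altUniques_mem msk k s).2 h1)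
  rw [hpred, find?_ofList]

-- per-length emptiness bridge
theorem empty_bridge (msk : String) (sz : Int) :
    (altUniques msk sz).isEmpty = !((checkDict msk sz).items.any (fun p => p.2 == 1)) := by
  rw [checkDict_eq_counter, PySem.Dict.items_counter, List.any_map]
  rw [← Bool.coe_iff_coe, List.isEmpty_iff, List.eq_nil_iff_forall_not_mem,
    Bool.not_eq_true', List.any_eq_false]
  constructor
  · intro h p hp
    simp only [Function.comp]
    intro hbeq
    have h1 : (altSubs msk sz).count p = 1 := by exact_mod_cast beq_iff_eq.1 hbeq
    exact (h p) ((altUniques_mem msk sz p).2 h1)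
  · intro h y hy
    have hc := (altUniques_mem msk sz y).1 hy
    have hymem : y ∈ altSubs msk sz := List.count_pos_iff.1 (by omega)
    have h2 := h y ((PySem.Set.mem_ofList _ _).2 hymem)
    simp only [Function.comp] at h2
    exact h2 (by simp [hc])

-- A's ok flag over the whole range
theorem foldOk (msk : String) (rng : List Int) (ok : Bool) :
    rng.foldl (fun ok sz => checkBreak1 (checkDict msk sz).items ok) ok
      = (ok && rng.all (fun sz => !((checkDict msk sz).items.any (fun p => p.2 == 1)))) := by
  induction rng generalizing ok with
  | nil => simp
  | cons sz rest ih =>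
    rw [List.foldl_cons, checkBreak1_eq, List.all_cons]
    by_cases h : (checkDict msk sz).items.any (fun p => p.2 == 1) = true
    · rw [if_pos h, ih]
      simp [h]
    · rw [if_neg h, ih]
      simp only [Bool.not_eq_true] at h
      simp [h]

-- B's early-return loop over the whole range
theorem altLoop_eq (msk : String) (k : Int) (rng : List Int) :
    altLoop msk k rng =
      if rng.all (fun sz => (altUniques msk sz).isEmpty) then
        some (msk, altFind (altSubs msk k) (altUniques msk k))
      else none := by
  induction rng with
  | nil => simp [altLoop]
  | cons sz rest ih =>
    simp only [altLoop, List.all_cons]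
    by_cases h : (altUniques msk sz).isEmpty = true <;> simp [h, ih]

-- ===== VERDICT (by name: the statement is the Claim_ definition above) =====
theorem check_spec : Claim_equal_check := by
  intro msk k _
  unfold Spec_check check check_alt
  rw [foldOk, altLoop_eq]
  have hall : (PySem.List.pyRange 1 k 1).all (fun sz => (altUniques msk sz).isEmpty)
      = (PySem.List.pyRange 1 k 1).all
          (fun sz => !((checkDict msk sz).items.any (fun p => p.2 == 1))) := by
    exact List.all_congr rfl fun sz => empty_bridge msk sz
  rw [hall]
  cases h : (PySem.List.pyRange 1 k 1).all
      (fun sz => !((checkDict msk sz).items.any (fun p => p.2 == 1))) with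
  | true => simp [now_eq msk k]
  | false => simp
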